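-- pv_equiv track=rewrite | github.com/successfuljosh/ds_algos | TQuant/maxPath.py | to_pyramid
-- ===== SOURCE A (Python) =====
-- def to_pyramid(node_val):
--     arr = []
--     count = 1
--     while count<=len(node_val):
--         arr.append(node_val[:count])
--         del node_val[:count]
--         count += 1
--     return arr
-- ===== SOURCE B (Python) =====
-- def to_pyramid(node_val):
--     # Row k (1-based) occupies indices [k*(k-1)//2, k*(k+1)//2); there are m full
--     # rows, where m is the largest integer with the triangular number T(m) <= len.
--     n = len(node_val)
--     m = 0
--     while (m + 1) * (m + 2) // 2 <= n:
--         m += 1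
--     return [node_val[k * (k - 1) // 2 : k * (k + 1) // 2] for k in range(1, m + 1)]
-- ===== Notes on version B (the rewrite author's own statement) =====
-- stated objective: faster
-- what changed: B first computes the number of complete rows from triangular numbers, then builds each row by direct index arithmetic in a comprehension, instead of A's destructive loop that repeatedly deletes the consumed prefix (shifting the remaining elements each iteration); B also leaves the input unmutated.
import Mathlib
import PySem

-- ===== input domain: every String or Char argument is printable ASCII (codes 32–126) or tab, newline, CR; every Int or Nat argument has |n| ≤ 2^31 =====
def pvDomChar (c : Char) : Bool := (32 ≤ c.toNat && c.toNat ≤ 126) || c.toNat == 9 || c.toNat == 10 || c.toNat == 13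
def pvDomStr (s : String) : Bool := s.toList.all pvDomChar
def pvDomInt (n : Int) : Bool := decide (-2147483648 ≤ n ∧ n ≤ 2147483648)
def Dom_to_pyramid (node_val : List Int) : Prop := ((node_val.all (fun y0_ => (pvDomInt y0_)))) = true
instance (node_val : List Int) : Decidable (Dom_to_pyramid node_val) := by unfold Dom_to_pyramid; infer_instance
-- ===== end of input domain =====

-- B computes the row count from triangular numbers and builds each row by direct index
-- arithmetic, instead of A's destructive prefix-deletion loop; equivalence is about the
-- RETURN value only — Python A empties its argument in place, B leaves it untouched.

-- ===== PORT A =====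
-- A's loop: while count ≤ len(node_val): append node_val[:count]; del node_val[:count]; count += 1.
-- node_val[:count] with count ≥ 1 is List.take count, del node_val[:count] is List.drop count
-- (exact: count is nonnegative). Termination: the list shrinks by count ≥ 1 each iteration.
def toPyrA (xs : List Int) (count : Nat) : List (List Int) :=
  if h : 1 ≤ count ∧ count ≤ xs.length then
    xs.take count :: toPyrA (xs.drop count) (count + 1)
  else []
termination_by xs.length
decreasing_by simp [List.length_drop]; omega

def to_pyramid (node_val : List Int) : List (List Int) := toPyrA node_val 1

-- ===== PORT B =====
-- B's first loop: m = 0; while (m+1)*(m+2)//2 <= n: m += 1.  All quantities are nonnegative,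
-- so Python's '//' is Nat division (exact here).  Termination of the loop (cited by rowCount):
theorem pvSuccLeOfTriLe (m n : Nat) (h : (m + 1) * (m + 2) / 2 ≤ n) : m + 1 ≤ n := by
  have h3 : m + 1 ≤ (m + 1) * (m + 2) / 2 := by
    rw [Nat.le_div_iff_mul_le (by omega : 0 < 2)]
    exact Nat.mul_le_mul_left _ (by omega)
  exact le_trans h3 h
def rowCount (n m : Nat) : Nat :=
  if (m + 1) * (m + 2) / 2 ≤ n then rowCount n (m + 1) else m
termination_by n + 1 - m
decreasing_by
  rename_i h; have := pvSuccLeOfTriLe m n h; omega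

-- B's comprehension: [node_val[k*(k-1)//2 : k*(k+1)//2] for k in range(1, m+1)]; the slice has
-- nonnegative in-range bounds, so it is (drop (k*(k-1)/2)).take (k*(k+1)/2 - k*(k-1)/2) = take k
-- of the drop (exact: k*(k+1)/2 - k*(k-1)/2 = k); range(1, m+1) is List.range m shifted by one.
def to_pyramid_alt (node_val : List Int) : List (List Int) :=
  let m := rowCount node_val.length 0
  (List.range m).map (fun j => (node_val.drop ((j + 1) * j / 2)).take (j + 1))

-- ===== PRECONDITION & SPEC =====
def Spec_to_pyramid (node_val : List Int) (out : List (List Int)) : Prop := out = to_pyramid_alt node_val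
instance (node_val : List Int) (out : List (List Int)) : Decidable (Spec_to_pyramid node_val out) := by unfold Spec_to_pyramid; infer_instance

-- ===== CLAIM (what is proved, stated in full; the proofs are below) =====
def Claim_equal_to_pyramid : Prop := ∀ (node_val : List Int), Dom_to_pyramid node_val → Spec_to_pyramid node_val (to_pyramid node_val)

-- ===== LEMMAS AND PROOFS =====
def tri (k : Nat) : Nat := k * (k + 1) / 2

theorem tri_succ (k : Nat) : tri (k + 1) = tri k + (k + 1) := by
  unfold tri
  have h : (k + 1) * (k + 2) = k * (k + 1) + (k + 1) * 2 := by ring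
  rw [h, Nat.add_mul_div_right _ _ (by omega : 0 < 2)]

theorem tri_mono {a b : Nat} (h : a ≤ b) : tri a ≤ tri b :=
  Nat.div_le_div_right (Nat.mul_le_mul h (by omega))

theorem rowCount_gt (n m : Nat) : ¬ tri (rowCount n m + 1) ≤ n := by
  by_cases h : (m + 1) * (m + 2) / 2 ≤ n
  · rw [rowCount, if_pos h]
    exact rowCount_gt n (m + 1)
  · rw [rowCount, if_neg h]
    simpa [tri, show (m+1)*(m+1+1) = (m+1)*(m+2) by ring] using h
termination_by n + 1 - m
decreasing_by have := pvSuccLeOfTriLe m n h; omega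

theorem rowCount_le (n m k : Nat) (hm : m ≤ k) (hk : k < rowCount n m) : tri (k + 1) ≤ n := by
  by_cases h : (m + 1) * (m + 2) / 2 ≤ n
  · rw [rowCount, if_pos h] at hk
    rcases Nat.eq_or_lt_of_le hm with rfl | hm'
    · simpa [tri, show (m+1)*(m+1+1) = (m+1)*(m+2) by ring] using h
    · exact rowCount_le n (m + 1) k hm' hk
  · rw [rowCount, if_neg h] at hk
    omega
termination_by n + 1 - m
decreasing_by have := pvSuccLeOfTriLe m n h; omega

theorem toPyrA_rows (xs : List Int) (k : Nat) :
    toPyrA (xs.drop (tri k)) (k + 1) =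
      (List.range (rowCount xs.length 0 - k)).map
        (fun j => (xs.drop ((k + j + 1) * (k + j) / 2)).take (k + j + 1)) := by
  set M := rowCount xs.length 0 with hM
  by_cases hkM : k < M
  · have htri : tri (k + 1) ≤ xs.length := rowCount_le xs.length 0 k (Nat.zero_le k) hkM
    rw [toPyrA]
    rw [dif_pos (by simp only [List.length_drop]; rw [tri_succ] at htri; omega)]
    have hdd : (xs.drop (tri k)).drop (k + 1) = xs.drop (tri (k + 1)) := by
      rw [List.drop_drop, tri_succ, Nat.add_comm]
    rw [hdd, toPyrA_rows xs (k + 1)]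
    have hr : M - k = (M - (k + 1)) + 1 := by omega
    rw [hr, List.range_succ_eq_map, List.map_cons, List.map_map]
    congr 1
    · simp [tri, Nat.mul_comm]
    · apply List.map_congr_left
      intro j _
      simp only [Function.comp_apply, Nat.succ_eq_add_one]
      rw [show k + (j + 1) = k + 1 + j from by omega]
  · rw [toPyrA]
    have hgt : ¬ tri (k + 1) ≤ xs.length := fun h =>
      rowCount_gt xs.length 0 (le_trans (tri_mono (by omega : M + 1 ≤ k + 1)) h)
    rw [dif_neg (by simp only [List.length_drop, not_and, not_le]; intro _; rw [tri_succ] at hgt; omega)]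
    rw [show M - k = 0 by omega]
    simp
termination_by rowCount xs.length 0 - k
decreasing_by omega

-- ===== VERDICT (by name: the statement is the Claim_ definition above) =====
theorem to_pyramid_spec : Claim_equal_to_pyramid := by
  intro xs _
  unfold Spec_to_pyramid to_pyramid to_pyramid_alt
  have h := toPyrA_rows xs 0
  simp only [tri, Nat.zero_mul, Nat.zero_div, List.drop_zero, Nat.sub_zero, Nat.zero_add] at h
  simpa using h
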